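-- pv_equiv track=rewrite | github.com/JohannesTimmreck/Tek5_AlgoGraph | task1/task1.py | __clusterSides
-- ===== SOURCE A (Python) =====
-- def __clusterSides(side, maxDistance, left):
--     neighborhood = []
--     for house in side:
--         if not neighborhood:
--             neighborhood.append([house])
--         elif(left == False and (neighborhood[-1][-1] + maxDistance) >= house
--             or left == True and (neighborhood[-1][-1] - maxDistance) <= house):
--             neighborhood[-1].append(house)
--         else:
--             neighborhood.append([house])
--     return neighborhood
-- ===== SOURCE B (Python) =====
-- def __clusterSides(side, maxDistance, left):
--     # Two-phase: compute run lengths first, then materialize the clusters.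
--     if not side:
--         return []
--     lens = []
--     cur = 1
--     for prev, house in zip(side, side[1:]):
--         within = (prev - maxDistance <= house) if left else (prev + maxDistance >= house)
--         if within:
--             cur += 1
--         else:
--             lens.append(cur)
--             cur = 1
--     lens.append(cur)
--     out = []
--     i = 0
--     for n in lens:
--         out.append(side[i:i + n])
--         i += n
--     return out
-- ===== Notes on version B (the rewrite author's own statement) =====
-- stated objective: alternative
-- what changed: B replaces A's single pass that grows the last nested group in place by a two-phase decomposition: first compute the run lengths of within-distance streaks over zip(side, side[1:]), then materialize the clusters by repeatedly splitting the list at those lengths.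
import Mathlib
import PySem

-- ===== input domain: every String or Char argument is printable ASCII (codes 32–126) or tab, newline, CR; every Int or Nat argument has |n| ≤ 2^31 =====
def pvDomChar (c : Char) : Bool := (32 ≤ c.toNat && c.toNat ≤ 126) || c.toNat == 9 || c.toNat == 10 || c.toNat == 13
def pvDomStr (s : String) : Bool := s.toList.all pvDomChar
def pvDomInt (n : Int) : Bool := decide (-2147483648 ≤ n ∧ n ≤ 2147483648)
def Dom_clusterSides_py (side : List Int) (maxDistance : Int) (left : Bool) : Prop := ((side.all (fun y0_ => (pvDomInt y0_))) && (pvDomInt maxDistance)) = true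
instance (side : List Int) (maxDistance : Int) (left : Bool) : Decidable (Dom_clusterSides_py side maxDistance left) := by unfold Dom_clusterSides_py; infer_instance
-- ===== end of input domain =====

-- B replaces A's grow-the-last-group pass by a two-phase decomposition (run lengths, then
-- materialize the clusters); objective: alternative structure, same cost.

-- ===== PORT A =====
-- one pass; neighborhood[-1][-1] is read with getLastD, exact because both lists are
-- nonempty in that branch (the last group always ends with the last appended house).
def clusterSides_py (side : List Int) (maxDistance : Int) (left : Bool) : List (List Int) :=
  side.foldl (fun neighborhood house =>
    if neighborhood = [] then
      neighborhood ++ [[house]]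
    else if (left = false ∧ (neighborhood.getLastD []).getLastD 0 + maxDistance ≥ house)
          ∨ (left = true ∧ (neighborhood.getLastD []).getLastD 0 - maxDistance ≤ house) then
      neighborhood.dropLast ++ [neighborhood.getLastD [] ++ [house]]
    else
      neighborhood ++ [[house]]) []

-- ===== PORT B =====
-- phase 1: run lengths over adjacent pairs (zip(side, side[1:])); counts are nonnegative,
-- kept as Nat; phase 2: side[i:i+n] with 0 ≤ i, 0 ≤ n is (side.drop i).take n (exact).
def clusterSides_py_alt (side : List Int) (maxDistance : Int) (left : Bool) : List (List Int) :=
  if side = [] then []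
  else
    let s := (side.zip side.tail).foldl (fun s pr =>
        let within := if left then decide (pr.1 - maxDistance ≤ pr.2)
                      else decide (pr.1 + maxDistance ≥ pr.2)
        if within then (s.1, s.2 + 1) else (s.1 ++ [s.2], 1))
      (([] : List Nat), (1 : Nat))
    let lens := s.1 ++ [s.2]
    (lens.foldl (fun s n => (s.1 ++ [(side.drop s.2).take n], s.2 + n))
      (([] : List (List Int)), (0 : Nat))).1

-- ===== PRECONDITION & SPEC =====
def Spec_clusterSides_py (side : List Int) (maxDistance : Int) (left : Bool) (out : List (List Int)) : Prop := out = clusterSides_py_alt side maxDistance left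
instance (side : List Int) (maxDistance : Int) (left : Bool) (out : List (List Int)) : Decidable (Spec_clusterSides_py side maxDistance left out) := by unfold Spec_clusterSides_py; infer_instance

-- ===== CLAIM (what is proved, stated in full; the proofs are below) =====
def Claim_equal_clusterSides_py : Prop := ∀ (side : List Int) (maxDistance : Int) (left : Bool), Dom_clusterSides_py side maxDistance left → Spec_clusterSides_py side maxDistance left (clusterSides_py side maxDistance left)

-- ===== LEMMAS AND PROOFS =====

-- the within-distance test both programs make between consecutive houses
def pvAdj (maxDistance : Int) (left : Bool) (p y : Int) : Bool :=
  if left then decide (p - maxDistance ≤ y) else decide (p + maxDistance ≥ y)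

-- reference grouping: current group `cur` (ending in `p`), remaining houses
def pvChunk (maxDistance : Int) (left : Bool) (cur : List Int) (p : Int) : List Int → List (List Int)
  | [] => [cur]
  | y :: ys =>
    if pvAdj maxDistance left p y then pvChunk maxDistance left (cur ++ [y]) y ys
    else cur :: pvChunk maxDistance left [y] y ys

-- reference run lengths, current run already of length c and ending in p
def pvLens (maxDistance : Int) (left : Bool) (p : Int) (c : Nat) : List Int → List Nat
  | [] => [c]
  | y :: ys =>
    if pvAdj maxDistance left p y then pvLens maxDistance left y (c + 1) ys
    else c :: pvLens maxDistance left y 1 ys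

def pvSplit (lens : List Nat) (l : List Int) : List (List Int) :=
  match lens with
  | [] => []
  | n :: ls => l.take n :: pvSplit ls (l.drop n)

theorem pvA_cond (md : Int) (left : Bool) (p y : Int) :
    ((left = false ∧ p + md ≥ y) ∨ (left = true ∧ p - md ≤ y)) ↔ pvAdj md left p y = true := by
  cases left <;> simp [pvAdj]

theorem pvA_go (md : Int) (left : Bool) :
    ∀ (xs : List Int) (gs : List (List Int)) (g : List Int) (p : Int),
    List.foldl (fun neighborhood house =>
      if neighborhood = [] then neighborhood ++ [[house]]
      else if (left = false ∧ (neighborhood.getLastD []).getLastD 0 + md ≥ house)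
            ∨ (left = true ∧ (neighborhood.getLastD []).getLastD 0 - md ≤ house) then
        neighborhood.dropLast ++ [neighborhood.getLastD [] ++ [house]]
      else neighborhood ++ [[house]]) (gs ++ [g ++ [p]]) xs
    = gs ++ pvChunk md left (g ++ [p]) p xs := by
  intro xs
  induction xs with
  | nil => intro gs g p; simp [pvChunk]
  | cons y ys ih =>
    intro gs g p
    have hne : gs ++ [g ++ [p]] ≠ [] := by simp
    have hlast : (gs ++ [g ++ [p]]).getLastD [] = g ++ [p] := by
      simp
    have hlast2 : (g ++ [p]).getLastD 0 = p := by simp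
    simp only [List.foldl_cons, if_neg hne, hlast, hlast2]
    by_cases hadj : pvAdj md left p y = true
    · rw [if_pos ((pvA_cond md left p y).mpr hadj)]
      have hdrop : (gs ++ [g ++ [p]]).dropLast = gs := by simp
      rw [hdrop]
      have : gs ++ [g ++ [p] ++ [y]] = gs ++ [(g ++ [p]) ++ [y]] := by simp
      rw [this, ih gs (g ++ [p]) y]
      simp [pvChunk, hadj]
    · rw [if_neg (fun h => hadj ((pvA_cond md left p y).mp h))]
      have : gs ++ [g ++ [p]] ++ [[y]] = (gs ++ [g ++ [p]]) ++ [([] : List Int) ++ [y]] := by simp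
      rw [this, ih (gs ++ [g ++ [p]]) [] y]
      simp [pvChunk, hadj]

theorem pvB_lens (md : Int) (left : Bool) :
    ∀ (xs : List Int) (p : Int) (acc : List Nat) (c : Nat),
    (let s := ((p :: xs).zip xs).foldl (fun s pr =>
        let within := if left then decide (pr.1 - md ≤ pr.2) else decide (pr.1 + md ≥ pr.2)
        if within then (s.1, s.2 + 1) else (s.1 ++ [s.2], 1)) (acc, c)
     s.1 ++ [s.2]) = acc ++ pvLens md left p c xs := by
  intro xs
  induction xs with
  | nil => intro p acc c; simp [pvLens]
  | cons y ys ih =>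
    intro p acc c
    have hz : (p :: y :: ys).zip (y :: ys) = (p, y) :: (y :: ys).zip ys := by simp
    simp only [hz, List.foldl_cons]
    by_cases hadj : pvAdj md left p y = true
    · have : (if left then decide (p - md ≤ y) else decide (p + md ≥ y)) = true := hadj
      simp only [this, if_true]
      rw [ih y acc (c + 1)]
      simp [pvLens, hadj]
    · have hf : pvAdj md left p y = false := by simpa using hadj
      unfold pvAdj at hf
      simp only [hf, Bool.false_eq_true, if_false]
      rw [ih y (acc ++ [c]) 1]
      simp [pvLens, hadj]

theorem pvB_split (side : List Int) :
    ∀ (lens : List Nat) (out : List (List Int)) (i : Nat),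
    (lens.foldl (fun s n => (s.1 ++ [(side.drop s.2).take n], s.2 + n)) (out, i)).1
    = out ++ pvSplit lens (side.drop i) := by
  intro lens
  induction lens with
  | nil => intro out i; simp [pvSplit]
  | cons n ls ih =>
    intro out i
    simp only [List.foldl_cons]
    rw [ih (out ++ [(side.drop i).take n]) (i + n)]
    have h : side.drop (i + n) = (side.drop i).drop n := by
      rw [List.drop_drop, Nat.add_comm]
    rw [h]
    simp only [pvSplit, List.append_assoc, List.cons_append, List.nil_append]

theorem pvKey (md : Int) (left : Bool) :
    ∀ (xs : List Int) (g : List Int) (p : Int),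
    pvSplit (pvLens md left p g.length xs) (g ++ xs) = pvChunk md left g p xs := by
  intro xs
  induction xs with
  | nil => intro g p; simp [pvLens, pvSplit, pvChunk]
  | cons y ys ih =>
    intro g p
    by_cases hadj : pvAdj md left p y = true
    · have h1 : pvLens md left p g.length (y :: ys) = pvLens md left y (g ++ [y]).length ys := by
        simp [pvLens, hadj]
      have h2 : g ++ y :: ys = (g ++ [y]) ++ ys := by simp
      rw [h1, h2, ih (g ++ [y]) y]
      simp [pvChunk, hadj]
    · have h1 : pvLens md left p g.length (y :: ys) = g.length :: pvLens md left y 1 ys := by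
        simp [pvLens, hadj]
      rw [h1]
      have htake : (g ++ y :: ys).take g.length = g := List.take_left ..
      have hdrop : (g ++ y :: ys).drop g.length = y :: ys := List.drop_left ..
      simp only [pvSplit, htake, hdrop]
      have : (y :: ys) = [y] ++ ys := by simp
      rw [this]
      have h3 : (1 : Nat) = ([y] : List Int).length := by simp
      rw [h3, ih [y] y]
      simp [pvChunk, hadj]

-- ===== VERDICT (by name: the statement is the Claim_ definition above) =====
theorem clusterSides_py_spec : Claim_equal_clusterSides_py := by
  intro side md left _
  show clusterSides_py side md left = clusterSides_py_alt side md left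
  cases side with
  | nil => rfl
  | cons x xs =>
    have hA : clusterSides_py (x :: xs) md left = pvChunk md left [x] x xs := by
      have hgo := pvA_go md left xs [] [] x
      simp only [List.nil_append] at hgo
      rw [← hgo]
      simp [clusterSides_py]
    have hB : clusterSides_py_alt (x :: xs) md left = pvChunk md left [x] x xs := by
      unfold clusterSides_py_alt
      rw [if_neg (by simp)]
      have hz : (x :: xs).zip (x :: xs).tail = (x :: xs).zip xs := by rfl
      simp only [hz]
      have hl := pvB_lens md left xs x [] 1
      simp only [List.nil_append] at hl
      simp only [hl]
      rw [pvB_split (x :: xs)]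
      have h1 : (1 : Nat) = ([x] : List Int).length := by simp
      rw [List.nil_append, List.drop_zero, h1]
      have : (x :: xs) = [x] ++ xs := by simp
      rw [this, pvKey md left xs [x] x]
    rw [hA, hB]
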